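-- pv_equiv track=rewrite | github.com/nedbat/coveragepy | lab/lnotab.py | lnotab
-- ===== SOURCE A (Python) =====
-- def lnotab(pairs, first_lineno=0):
--     """Yields byte integers representing the pairs of integers passed in."""
--     assert first_lineno <= pairs[0][1]
--     cur_byte, cur_line = 0, first_lineno
--     for byte_off, line_off in pairs:
--         byte_delta = byte_off - cur_byte
--         line_delta = line_off - cur_line
--         assert byte_delta >= 0
--         assert line_delta >= 0
--         while byte_delta > 255:
--             yield 255 # byte
--             yield 0   # line
--             byte_delta -= 255
--         yield byte_delta
--         while line_delta > 255:
--             yield 255 # line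
--             yield 0   # byte
--             line_delta -= 255
--         yield line_delta
--         cur_byte, cur_line = byte_off, line_off
-- ===== SOURCE B (Python) =====
-- def lnotab(pairs, first_lineno=0):
--     """Yields byte integers representing the pairs of integers passed in."""
--     assert first_lineno <= pairs[0][1]
--     out = []
--     prevs = [(0, first_lineno)] + pairs[:-1]
--     for (prev_byte, prev_line), (byte_off, line_off) in zip(prevs, pairs):
--         for delta in (byte_off - prev_byte, line_off - prev_line):
--             assert delta >= 0
--             if delta == 0:
--                 out.append(0)
--             else:
--                 q, r = divmod(delta - 1, 255)
--                 out.extend([255, 0] * q)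
--                 out.append(r + 1)
--     return out
-- ===== Notes on version B (the rewrite author's own statement) =====
-- stated objective: alternative
-- what changed: Replaces A's two repeated-subtraction while loops (yielding 255,0 until the delta fits) with a single delta encoder that computes the number of 255-chunks in closed form via divmod(delta-1, 255), driven by a zip over (prev, current) pairs instead of mutable cur_byte/cur_line state.
import Mathlib
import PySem

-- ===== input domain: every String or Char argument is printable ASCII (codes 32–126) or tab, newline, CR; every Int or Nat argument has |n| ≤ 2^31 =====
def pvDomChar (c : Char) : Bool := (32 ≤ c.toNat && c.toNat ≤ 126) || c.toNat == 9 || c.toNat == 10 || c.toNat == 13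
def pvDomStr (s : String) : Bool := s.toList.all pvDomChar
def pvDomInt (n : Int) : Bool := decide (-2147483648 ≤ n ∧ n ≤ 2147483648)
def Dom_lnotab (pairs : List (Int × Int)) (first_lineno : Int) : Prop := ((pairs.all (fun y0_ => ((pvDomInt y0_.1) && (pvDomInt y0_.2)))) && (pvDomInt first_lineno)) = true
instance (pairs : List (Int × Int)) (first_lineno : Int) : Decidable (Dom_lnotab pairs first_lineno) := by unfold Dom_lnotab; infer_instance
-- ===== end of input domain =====

-- B replaces A's repeated-subtraction while loops by a closed-form divmod chunk
-- computation and a single encoder applied to both deltas (alternative decomposition;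
-- return value equivalence only — both are pure).

-- ===== PORT A =====
-- A's 'while delta > 255: yield 255; yield 0; delta -= 255' followed by 'yield delta'
-- (the flat byte sequence is the same for the byte loop and the line loop)
def lnotabChunkA (d : Int) : List Int :=
  if d > 255 then 255 :: 0 :: lnotabChunkA (d - 255) else [d]
termination_by d.toNat
decreasing_by omega

-- A's for-loop over pairs carrying (cur_byte, cur_line)
def lnotabLoopA (pairs : List (Int × Int)) (cur_byte cur_line : Int) : List Int :=
  match pairs with
  | [] => []
  | (byte_off, line_off) :: rest =>
      lnotabChunkA (byte_off - cur_byte) ++ lnotabChunkA (line_off - cur_line) ++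
        lnotabLoopA rest byte_off line_off

def lnotab (pairs : List (Int × Int)) (first_lineno : Int) : List Int :=
  lnotabLoopA pairs 0 first_lineno

-- ===== PORT B =====
-- emits one delta: [0] for 0, else q = (d-1)//255 copies of (255,0) then r+1
def lnotabEncodeB (d : Int) : List Int :=
  if d = 0 then [0]
  else
    (List.replicate (PySem.Int.floordiv (d - 1) 255).toNat ([255, 0] : List Int)).flatten
      ++ [PySem.Int.mod (d - 1) 255 + 1]

def lnotab_alt (pairs : List (Int × Int)) (first_lineno : Int) : List Int :=
  (((0, first_lineno) :: pairs.dropLast).zip pairs).flatMap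
    (fun pc => [pc.2.1 - pc.1.1, pc.2.2 - pc.1.2].flatMap lnotabEncodeB)

-- ===== PRECONDITION & SPEC =====
-- Pre_ excludes exactly the inputs where A raises: empty pairs (IndexError on
-- pairs[0][1]) and any negative byte/line delta (AssertionError); both programs raise there.
def Pre_lnotab (pairs : List (Int × Int)) (first_lineno : Int) : Prop :=
  pairs ≠ [] ∧
    List.IsChain (fun p q : Int × Int => p.1 ≤ q.1 ∧ p.2 ≤ q.2) ((0, first_lineno) :: pairs)
instance (pairs : List (Int × Int)) (first_lineno : Int) : Decidable (Pre_lnotab pairs first_lineno) := by unfold Pre_lnotab; infer_instance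

def pvWitness_lnotab : (List (Int × Int)) × Int := ([(1, 2), (300, 2)], 1)

def Spec_lnotab (pairs : List (Int × Int)) (first_lineno : Int) (out : List Int) : Prop := out = lnotab_alt pairs first_lineno
instance (pairs : List (Int × Int)) (first_lineno : Int) (out : List Int) : Decidable (Spec_lnotab pairs first_lineno out) := by unfold Spec_lnotab; infer_instance

-- ===== CLAIM (what is proved, stated in full; the proofs are below) =====
def Claim_equal_lnotab : Prop := ∀ (pairs : List (Int × Int)) (first_lineno : Int), Dom_lnotab pairs first_lineno → Pre_lnotab pairs first_lineno → Spec_lnotab pairs first_lineno (lnotab pairs first_lineno)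

-- ===== LEMMAS AND PROOFS =====

lemma lnotab_chunk_eq (d : Int) (hd : 0 ≤ d) : lnotabChunkA d = lnotabEncodeB d := by
  rw [lnotabChunkA]
  split
  · -- d > 255
    rename_i h
    rw [lnotab_chunk_eq (d - 255) (by omega)]
    have h255 : (0:Int) < 255 := by norm_num
    unfold lnotabEncodeB
    rw [if_neg (by omega), if_neg (by omega),
      PySem.Int.floordiv_eq_ediv_of_pos h255, PySem.Int.floordiv_eq_ediv_of_pos h255,
      PySem.Int.mod_eq_emod_of_pos h255, PySem.Int.mod_eq_emod_of_pos h255]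
    have hq : (d - 1) / 255 = (d - 255 - 1) / 255 + 1 := by omega
    have hr : (d - 1) % 255 = (d - 255 - 1) % 255 := by omega
    have hq0 : 0 ≤ (d - 255 - 1) / 255 := by omega
    rw [hq, hr]
    have : ((d - 255 - 1) / 255 + 1).toNat = ((d - 255 - 1) / 255).toNat + 1 := by omega
    rw [this, List.replicate_succ, List.flatten_cons]
    simp
  · -- d ≤ 255
    rename_i h
    unfold lnotabEncodeB
    by_cases h0 : d = 0
    · simp [h0]
    · rw [if_neg h0]
      have h255 : (0:Int) < 255 := by norm_num
      rw [PySem.Int.floordiv_eq_ediv_of_pos h255, PySem.Int.mod_eq_emod_of_pos h255]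
      have hq : (d - 1) / 255 = 0 := by omega
      have hr : (d - 1) % 255 = d - 1 := by omega
      rw [hq, hr]
      simp
termination_by d.toNat
decreasing_by omega

lemma lnotab_zip_dropLast (c : Int × Int) (rest : List (Int × Int)) :
    ((c :: rest).dropLast).zip rest = (c :: rest.dropLast).zip rest := by
  cases rest <;> simp [List.dropLast]

lemma lnotab_loop_eq (pairs : List (Int × Int)) (cb cl : Int)
    (h : List.IsChain (fun p q : Int × Int => p.1 ≤ q.1 ∧ p.2 ≤ q.2) ((cb, cl) :: pairs)) :
    lnotabLoopA pairs cb cl =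
      (((cb, cl) :: pairs.dropLast).zip pairs).flatMap
        (fun pc => [pc.2.1 - pc.1.1, pc.2.2 - pc.1.2].flatMap lnotabEncodeB) := by
  induction pairs generalizing cb cl with
  | nil => simp [lnotabLoopA]
  | cons c rest ih =>
    obtain ⟨b, l⟩ := c
    rcases List.isChain_cons_cons.mp h with ⟨⟨hb, hl⟩, hrest⟩
    have hdl := lnotab_zip_dropLast (b, l) rest
    simp only [lnotabLoopA, ih b l hrest]
    cases rest with
    | nil =>
      simp [lnotab_chunk_eq _ (by omega : (0:Int) ≤ b - cb),
            lnotab_chunk_eq _ (by omega : (0:Int) ≤ l - cl)]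
    | cons c2 r2 =>
      simp only [List.zip_cons_cons, List.flatMap_cons, ← hdl]
      simp [lnotab_chunk_eq _ (by omega : (0:Int) ≤ b - cb),
            lnotab_chunk_eq _ (by omega : (0:Int) ≤ l - cl)]

-- ===== VERDICT (by name: the statement is the Claim_ definition above) =====
theorem lnotab_spec : Claim_equal_lnotab := by
  intro pairs first_lineno _ hpre
  unfold Spec_lnotab lnotab lnotab_alt
  exact lnotab_loop_eq pairs 0 first_lineno hpre.2
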